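-- pv_equiv track=rewrite | github.com/dudamarlena/pyc_source | pycfiles/colorecho-0.1.tar/diff.cpython-34.py | split_diffs
-- ===== SOURCE A (Python) =====
-- def split_diffs(text):
--     """Split up a diff output, which can potentially contain
--     multiple diffs, into a list of Diff objects
--     """
--     arr = []
--     for t in text:
--         if t.startswith('diff') and len(arr) != 0:
--             yield arr
--             arr = [t]
--         else:
--             arr.append(t)
--
--     yield arr
-- ===== SOURCE B (Python) =====
-- def split_diffs(text):
--     """Split up a diff output, which can potentially contain
--     multiple diffs, into a list of Diff objects
--     """
--     lines = list(text)
--     splits = [i for i, line in enumerate(lines) if i > 0 and line.startswith('diff')]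
--     boundaries = [0] + splits + [len(lines)]
--     for a, b in zip(boundaries, boundaries[1:]):
--         yield lines[a:b]
-- ===== Notes on version B (the rewrite author's own statement) =====
-- stated objective: alternative
-- what changed: B first computes the split indices (positions > 0 of lines starting with 'diff') and yields slices of the materialized line list between consecutive boundaries, instead of carrying a running accumulator group through a single loop.
import Mathlib
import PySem

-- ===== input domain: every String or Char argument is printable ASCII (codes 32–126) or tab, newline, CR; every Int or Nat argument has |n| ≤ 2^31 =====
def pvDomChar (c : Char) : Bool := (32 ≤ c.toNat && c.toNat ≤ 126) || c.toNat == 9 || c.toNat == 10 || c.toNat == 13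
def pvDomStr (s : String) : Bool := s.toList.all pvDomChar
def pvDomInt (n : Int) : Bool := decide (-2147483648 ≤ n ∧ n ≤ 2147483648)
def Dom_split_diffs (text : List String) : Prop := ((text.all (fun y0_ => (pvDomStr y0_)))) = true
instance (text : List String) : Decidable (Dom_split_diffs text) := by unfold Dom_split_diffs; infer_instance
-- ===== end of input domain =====

-- B computes split indices and slices between consecutive boundaries instead of a running accumulator (alternative decomposition, same cost).


-- ===== PORT A =====
def stepA (p : List (List String) × List String) (t : String) : List (List String) × List String :=
  if PySem.Str.startswith t "diff" = true ∧ p.2.length ≠ 0 then (p.1 ++ [p.2], [t])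
  else (p.1, p.2 ++ [t])

def split_diffs (text : List String) : List (List String) :=
  let st := text.foldl stepA ([], [])
  st.1 ++ [st.2]

-- ===== PORT B =====
def split_diffs_alt (text : List String) : List (List String) :=
  let lines := text
  let splits : List Int :=
    ((PySem.List.enumerate lines 0).filter
      (fun p => decide (0 < p.1) && PySem.Str.startswith p.2 "diff")).map (·.1)
  let boundaries : List Int := [0] ++ splits ++ [(lines.length : Int)]
  (boundaries.zip boundaries.tail).map (fun p => PySem.List.slice lines (some p.1) (some p.2))

-- ===== PRECONDITION & SPEC =====
def Spec_split_diffs (text : List String) (out : List (List String)) : Prop := out = split_diffs_alt text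
instance (text : List String) (out : List (List String)) : Decidable (Spec_split_diffs text out) := by unfold Spec_split_diffs; infer_instance

-- ===== CLAIM (what is proved, stated in full; the proofs are below) =====
def Claim_equal_split_diffs : Prop := ∀ (text : List String), Dom_split_diffs text → Spec_split_diffs text (split_diffs text)

-- ===== LEMMAS AND PROOFS =====

-- A's running group is nonempty as soon as one element has been consumed.
theorem foldl_stepA_snd_ne (rest : List String) :
    ∀ (out : List (List String)) (cur : List String), cur ≠ [] →
      (rest.foldl stepA (out, cur)).2 ≠ [] := by
  induction rest with
  | nil => intro out cur h; simpa using h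
  | cons t rs ih =>
    intro out cur h
    simp only [List.foldl_cons]
    unfold stepA
    split_ifs <;> exact ih _ _ (by simp)

theorem stA_snd_ne (xs : List String) (h : xs ≠ []) :
    (xs.foldl stepA ([], [])).2 ≠ [] := by
  cases xs with
  | nil => exact absurd rfl h
  | cons y ys =>
    simp only [List.foldl_cons]
    have : stepA ([], []) y = ([], [y]) := by simp [stepA]
    rw [this]
    exact foldl_stepA_snd_ne ys [] [y] (by simp)

-- zip-with-tail of a snocced list
theorem zip_tail_snoc (l : List Int) : ∀ (a m : Int),
    ((a :: (l ++ [m])).zip (l ++ [m])) =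
      ((a :: l).zip l) ++ [((a :: l).getLast (by simp), m)] := by
  induction l with
  | nil => intro a m; simp
  | cons b l' ih =>
    intro a m
    simp only [List.cons_append, List.zip_cons_cons]
    rw [ih b m]
    simp [List.getLast]

-- elements of the splits list are indices in [0, len)
theorem splits_mem_bound (xs : List String) (i : Int)
    (h : i ∈ ((PySem.List.enumerate xs 0).filter
      (fun p => decide (0 < p.1) && PySem.Str.startswith p.2 "diff")).map (·.1)) :
    0 ≤ i ∧ i < (xs.length : Int) := by
  simp only [List.mem_map, List.mem_filter] at h
  obtain ⟨p, ⟨hmem, _⟩, rfl⟩ := h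
  rw [PySem.List.mem_enumerate_iff] at hmem
  obtain ⟨k, hk, rfl⟩ := hmem
  constructor
  · simp
  · simp; omega

theorem slice_append_le {α : Type} (xs : List α) (x : α) (a b : Int)
    (ha : 0 ≤ a) (hb : 0 ≤ b) (hbn : b ≤ (xs.length : Int)) :
    PySem.List.slice (xs ++ [x]) (some a) (some b) = PySem.List.slice xs (some a) (some b) := by
  rw [PySem.List.slice_toNat (xs ++ [x]) ha hb, PySem.List.slice_toNat xs ha hb]
  by_cases hab : a.toNat ≤ xs.length
  · rw [List.drop_append_of_le_length hab]
    rw [List.take_append_of_le_length (by simp <;> omega)]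
  · have h0 : b.toNat - a.toNat = 0 := by omega
    simp [h0]

theorem slice_append_last {α : Type} (xs : List α) (x : α) (a : Int)
    (ha : 0 ≤ a) (han : a ≤ (xs.length : Int)) :
    PySem.List.slice (xs ++ [x]) (some a) (some ((xs.length : Int) + 1)) =
      PySem.List.slice xs (some a) (some (xs.length : Int)) ++ [x] := by
  rw [PySem.List.slice_toNat (xs ++ [x]) ha (by omega), PySem.List.slice_toNat xs ha (by omega)]
  have hale : a.toNat ≤ xs.length := by omega
  rw [List.drop_append_of_le_length hale]
  rw [List.take_of_length_le (by simp <;> omega)]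
  rw [List.take_of_length_le (by simp <;> omega)]

-- unfolded form of split_diffs_alt
theorem alt_eq (xs : List String) :
    split_diffs_alt xs =
      (((0 : Int) :: ((((PySem.List.enumerate xs 0).filter
          (fun p => decide (0 < p.1) && PySem.Str.startswith p.2 "diff")).map (·.1)) ++ [(xs.length : Int)])).zip
        ((((PySem.List.enumerate xs 0).filter
          (fun p => decide (0 < p.1) && PySem.Str.startswith p.2 "diff")).map (·.1)) ++ [(xs.length : Int)])).map
        (fun p => PySem.List.slice xs (some p.1) (some p.2)) := by
  rfl

theorem main_eq (xs : List String) :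
    split_diffs_alt xs = (xs.foldl stepA ([], [])).1 ++ [(xs.foldl stepA ([], [])).2] := by
  induction xs using List.reverseRecOn with
  | nil => rfl
  | append_singleton xs x ih =>
    set spl := ((PySem.List.enumerate xs 0).filter
        (fun p => decide (0 < p.1) && PySem.Str.startswith p.2 "diff")).map (·.1) with hspl
    have hb : ∀ i ∈ spl, 0 ≤ i ∧ i < (xs.length : Int) := fun i hi => splits_mem_bound xs i hi
    -- the splits of xs ++ [x]
    have hsingle : ∀ s : Int, ((PySem.List.enumerate [x] s).filter
        (fun p => decide (0 < p.1) && PySem.Str.startswith p.2 "diff")).map (·.1)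
        = if 0 < s ∧ PySem.Str.startswith x "diff" = true then [s] else [] := by
      intro s
      have henl : PySem.List.enumerate [x] s = [(s, x)] := by
        rw [PySem.List.enumerate_cons, PySem.List.enumerate_nil]
      by_cases hc : 0 < s ∧ PySem.Str.startswith x "diff" = true
      · have h2 : PySem.Chars.startswith x.toList ['d', 'i', 'f', 'f'] = true := by
          simpa using hc.2
        rw [if_pos hc]
        simp [henl, List.filter_singleton, hc.1, h2]
      · rw [if_neg hc]
        rcases Decidable.not_and_iff_not_or_not.mp hc with h1 | h1
        · simp [henl, List.filter_singleton, h1]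
        · have h2 : PySem.Chars.startswith x.toList ['d', 'i', 'f', 'f'] = false := by
            rw [Bool.not_eq_true] at h1; simpa using h1
          simp [henl, List.filter_singleton, h2]
    have henum : ((PySem.List.enumerate (xs ++ [x]) 0).filter
        (fun p => decide (0 < p.1) && PySem.Str.startswith p.2 "diff")).map (·.1)
        = spl ++ (if 0 < (xs.length : Int) ∧ PySem.Str.startswith x "diff" = true
                  then [(xs.length : Int)] else []) := by
      rw [PySem.List.enumerate_append, List.filter_append, List.map_append, hsingle]
      simp only [zero_add]
      rw [← hspl]
    have hlen : (((xs ++ [x]).length : Nat) : Int) = (xs.length : Int) + 1 := by simp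
    rw [List.foldl_append]
    by_cases hc : PySem.Str.startswith x "diff" = true ∧ xs ≠ []
    · -- a new group [x] is started
      have hxs0 : 0 < (xs.length : Int) := by
        cases xs with
        | nil => exact absurd rfl hc.2
        | cons _ _ => simp
      have hne : (xs.foldl stepA ([], [])).2 ≠ [] := stA_snd_ne xs hc.2
      have hstep : stepA (xs.foldl stepA ([], [])) x
          = ((xs.foldl stepA ([], [])).1 ++ [(xs.foldl stepA ([], [])).2], [x]) := by
        simp only [stepA]; rw [if_pos ⟨hc.1, by simpa using hne⟩]
      rw [alt_eq, henum, hlen, if_pos ⟨hxs0, hc.1⟩]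
      simp only [List.foldl_cons, List.foldl_nil, hstep]
      have hassoc : spl ++ [(xs.length : Int)] ++ [(xs.length : Int) + 1]
          = (spl ++ [(xs.length : Int)]) ++ [(xs.length : Int) + 1] := by simp
      rw [hassoc, zip_tail_snoc, List.map_append]
      have hlast : ((0 : Int) :: (spl ++ [(xs.length : Int)])).getLast (by simp) = (xs.length : Int) := by
        simp
      rw [hlast]
      have hmapeq : ((((0:Int) :: (spl ++ [(xs.length : Int)])).zip (spl ++ [(xs.length : Int)])).map
            (fun p => PySem.List.slice (xs ++ [x]) (some p.1) (some p.2)))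
          = ((((0:Int) :: (spl ++ [(xs.length : Int)])).zip (spl ++ [(xs.length : Int)])).map
            (fun p => PySem.List.slice xs (some p.1) (some p.2))) := by
        apply List.map_congr_left
        intro p hp
        have h1 := (List.of_mem_zip hp).1
        have h2 := (List.of_mem_zip hp).2
        have hp1 : 0 ≤ p.1 := by
          rcases List.mem_cons.mp h1 with h | h
          · omega
          · rcases List.mem_append.mp h with h | h
            · exact (hb _ h).1
            · simp at h; omega
        have hp2a : 0 ≤ p.2 ∧ p.2 ≤ (xs.length : Int) := by
          rcases List.mem_append.mp h2 with h | h
          · have := hb _ h; omega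
          · simp at h; omega
        exact slice_append_le xs x p.1 p.2 hp1 hp2a.1 hp2a.2
      rw [hmapeq, ← alt_eq, ih]
      simp only [List.map_cons, List.map_nil]
      have hlastslice : PySem.List.slice (xs ++ [x]) (some (xs.length : Int)) (some ((xs.length : Int) + 1)) = [x] := by
        rw [slice_append_last xs x _ (by omega) (by omega)]
        rw [PySem.List.slice_toNat xs (by omega : (0:Int) ≤ (xs.length : Int)) (by omega)]
        simp
      rw [hlastslice]
    · -- x is appended to the current group
      have hcondA : ¬ (PySem.Str.startswith x "diff" = true ∧ (xs.foldl stepA ([], [])).2.length ≠ 0) := by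
        intro hcc
        by_cases hxs : xs = []
        · subst hxs; exact hcc.2 rfl
        · exact hc ⟨hcc.1, hxs⟩
      have hstep : stepA (xs.foldl stepA ([], [])) x
          = ((xs.foldl stepA ([], [])).1, (xs.foldl stepA ([], [])).2 ++ [x]) := by
        simp only [stepA]; rw [if_neg hcondA]
      have hcondB : ¬ (0 < (xs.length : Int) ∧ PySem.Str.startswith x "diff" = true) := by
        intro hcc
        exact hc ⟨hcc.2, by cases xs with | nil => simp at hcc | cons _ _ => simp⟩
      rw [alt_eq, henum, hlen, if_neg hcondB]
      simp only [List.foldl_cons, List.foldl_nil, hstep, List.append_nil]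
      rw [zip_tail_snoc, List.map_append]
      set lst := ((0 : Int) :: spl).getLast (by simp) with hlst
      have hlstmem : lst ∈ (0 : Int) :: spl := List.getLast_mem _
      have hlstb : 0 ≤ lst ∧ lst ≤ (xs.length : Int) := by
        rcases List.mem_cons.mp hlstmem with h | h
        · omega
        · have := hb _ h; omega
      have hmapeq : ((((0:Int) :: spl).zip spl).map
            (fun p => PySem.List.slice (xs ++ [x]) (some p.1) (some p.2)))
          = ((((0:Int) :: spl).zip spl).map
            (fun p => PySem.List.slice xs (some p.1) (some p.2))) := by
        apply List.map_congr_left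
        intro p hp
        have h1 := (List.of_mem_zip hp).1
        have h2 := (List.of_mem_zip hp).2
        have hp1 : 0 ≤ p.1 := by
          rcases List.mem_cons.mp h1 with h | h
          · omega
          · exact (hb _ h).1
        have hp2 := hb _ h2
        exact slice_append_le xs x p.1 p.2 hp1 hp2.1 (le_of_lt hp2.2)
      simp only [List.map_cons, List.map_nil]
      rw [hmapeq]
      have hB : split_diffs_alt xs
          = (((0:Int) :: spl).zip spl).map (fun p => PySem.List.slice xs (some p.1) (some p.2))
            ++ [PySem.List.slice xs (some lst) (some (xs.length : Int))] := by
        rw [alt_eq, ← hspl, zip_tail_snoc, List.map_append, ← hlst]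
        simp only [List.map_cons, List.map_nil]
      have hsplit := hB.symm.trans ih
      obtain ⟨hEq1, hEq2⟩ := List.append_inj' hsplit (by simp)
      rw [slice_append_last xs x lst hlstb.1 hlstb.2]
      rw [hEq1]
      have hEq2' : PySem.List.slice xs (some lst) (some (xs.length : Int))
          = (xs.foldl stepA ([], [])).2 := by
        simpa using hEq2
      rw [hEq2']

-- ===== VERDICT (by name: the statement is the Claim_ definition above) =====
theorem split_diffs_spec : Claim_equal_split_diffs := by
  intro text _
  unfold Spec_split_diffs split_diffs
  exact (main_eq text).symm
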